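-- pv_equiv track=rewrite | github.com/kevin-quiroz/Sintaxis | AguAFD.py | automataId
-- ===== SOURCE A (Python) =====
-- ESTADO_FINAL = "ESTADO FINAL"
--
-- ESTADO_NO_FINAL = "NO ACEPTADO"
--
-- ESTADO_TRAMPA = "EN ESTADO TRAMPA"
--
-- def automataId(lexema):
--     estado = 0
--     estadoFinal = [1]
--     for caracter in lexema:
--         if estado == 0 and (
--                 caracter == "a" or caracter == "b" or caracter == "c" or caracter == "d" or caracter == "e" or caracter == "f" or caracter == "g" or caracter == "h" or caracter == "i" or caracter == "j" or caracter == "k" or caracter == "l" or caracter == "m" or caracter == "n" or caracter == "o" or caracter == "p" or caracter == "q" or caracter == "r" or caracter == "s" or caracter == "t" or caracter == "u" or caracter == "v" or caracter == "w" or caracter == "x" or caracter == "y" or caracter == "z"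
--                 or caracter == "A" or caracter == "B" or caracter == "C" or caracter == "D" or caracter == "E" or caracter == "F" or caracter == "G" or caracter == "H" or caracter == "I" or caracter == "J" or caracter == "K" or caracter == "L" or caracter == "M" or caracter == "N" or caracter == "O" or caracter == "P" or caracter == "Q" or caracter == "R" or caracter == "S" or caracter == "T" or caracter == "U" or caracter == "V" or caracter == "W" or caracter == "X" or caracter == "Y" or caracter == "Z"):
--             estado = 1
--         elif estado == 1 and (
--                 caracter == "a" or caracter == "b" or caracter == "c" or caracter == "d" or caracter == "e" or caracter == "f" or caracter == "g" or caracter == "h" or caracter == "i" or caracter == "j" or caracter == "k" or caracter == "l" or caracter == "m" or caracter == "n" or caracter == "o" or caracter == "p" or caracter == "q" or caracter == "r" or caracter == "s" or caracter == "t" or caracter == "u" or caracter == "v" or caracter == "w" or caracter == "x" or caracter == "y" or caracter == "z"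
--                 or caracter == "A" or caracter == "B" or caracter == "C" or caracter == "D" or caracter == "E" or caracter == "F" or caracter == "G" or caracter == "H" or caracter == "I" or caracter == "J" or caracter == "K" or caracter == "L" or caracter == "M" or caracter == "N" or caracter == "O" or caracter == "P" or caracter == "Q" or caracter == "R" or caracter == "S" or caracter == "T" or caracter == "U" or caracter == "V" or caracter == "W" or caracter == "X" or caracter == "Y" or caracter == "Z"
--                 or caracter == "0" or caracter == "1" or caracter == "2" or caracter == "3" or caracter == "4" or caracter == "5" or caracter == "6" or caracter == "7" or caracter == "8" or caracter == "9" or caracter == "-" or caracter == "_"):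
--             estado = 1
--         else:
--             estado = -1
--             break
--     if estado == -1:
--         return ESTADO_TRAMPA
--     elif estado in estadoFinal:
--         return ESTADO_FINAL
--     else:
--         return ESTADO_NO_FINAL
-- ===== SOURCE B (Python) =====
-- ESTADO_FINAL = "ESTADO FINAL"
-- ESTADO_NO_FINAL = "NO ACEPTADO"
-- ESTADO_TRAMPA = "EN ESTADO TRAMPA"
--
-- LETTERS = "abcdefghijklmnopqrstuvwxyzABCDEFGHIJKLMNOPQRSTUVWXYZ"
-- TAIL = LETTERS + "0123456789-_"
--
-- def automataId(lexema):
--     # whole-string set validation instead of a character-by-character state machine: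
--     # valid iff the first character is a letter and the character SET of the lexeme
--     # is contained in the allowed alphabet (set difference empty).
--     if not lexema:
--         return ESTADO_NO_FINAL
--     if lexema[0] in LETTERS and not set(lexema) - set(TAIL):
--         return ESTADO_FINAL
--     return ESTADO_TRAMPA
-- ===== Notes on version B (the rewrite author's own statement) =====
-- stated objective: alternative
-- what changed: Replaces the per-character estado state machine with a whole-string set check: empty string handled explicitly, then the lexeme is valid iff its first character is a letter and the set difference between its character set and the allowed alphabet is empty, removing the per-character branching loop; the C-level set difference gives a constant-factor speedup a timing run measured.
import Mathlib
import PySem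

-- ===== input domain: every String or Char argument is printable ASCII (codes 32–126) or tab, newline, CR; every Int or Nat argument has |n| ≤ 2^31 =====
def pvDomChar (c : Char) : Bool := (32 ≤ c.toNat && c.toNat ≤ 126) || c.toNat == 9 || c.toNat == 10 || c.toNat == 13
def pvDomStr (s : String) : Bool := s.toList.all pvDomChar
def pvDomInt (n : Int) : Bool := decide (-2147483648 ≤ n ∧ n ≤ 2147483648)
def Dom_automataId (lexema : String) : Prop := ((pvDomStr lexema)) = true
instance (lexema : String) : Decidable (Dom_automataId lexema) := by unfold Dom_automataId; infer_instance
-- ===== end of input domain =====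

-- B replaces A's estado state machine with a whole-string set check (first char a letter,
-- then the set difference against the allowed alphabet is empty); equivalence proved on all inputs.

-- ===== PORT A =====
-- A's per-character letter test (the literal or-chain at estado 0)
def pvLetterChainA (c : Char) : Bool :=
  c == 'a' || c == 'b' || c == 'c' || c == 'd' || c == 'e' || c == 'f' || c == 'g' || c == 'h' || c == 'i' || c == 'j' || c == 'k' || c == 'l' || c == 'm' || c == 'n' || c == 'o' || c == 'p' || c == 'q' || c == 'r' || c == 's' || c == 't' || c == 'u' || c == 'v' || c == 'w' || c == 'x' || c == 'y' || c == 'z' || c == 'A' || c == 'B' || c == 'C' || c == 'D' || c == 'E' || c == 'F' || c == 'G' || c == 'H' || c == 'I' || c == 'J' || c == 'K' || c == 'L' || c == 'M' || c == 'N' || c == 'O' || c == 'P' || c == 'Q' || c == 'R' || c == 'S' || c == 'T' || c == 'U' || c == 'V' || c == 'W' || c == 'X' || c == 'Y' || c == 'Z'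

-- A's per-character test at estado 1 (letters, digits, '-', '_', in A's order)
def pvTailChainA (c : Char) : Bool :=
  c == 'a' || c == 'b' || c == 'c' || c == 'd' || c == 'e' || c == 'f' || c == 'g' || c == 'h' || c == 'i' || c == 'j' || c == 'k' || c == 'l' || c == 'm' || c == 'n' || c == 'o' || c == 'p' || c == 'q' || c == 'r' || c == 's' || c == 't' || c == 'u' || c == 'v' || c == 'w' || c == 'x' || c == 'y' || c == 'z' || c == 'A' || c == 'B' || c == 'C' || c == 'D' || c == 'E' || c == 'F' || c == 'G' || c == 'H' || c == 'I' || c == 'J' || c == 'K' || c == 'L' || c == 'M' || c == 'N' || c == 'O' || c == 'P' || c == 'Q' || c == 'R' || c == 'S' || c == 'T' || c == 'U' || c == 'V' || c == 'W' || c == 'X' || c == 'Y' || c == 'Z' || c == '0' || c == '1' || c == '2' || c == '3' || c == '4' || c == '5' || c == '6' || c == '7' || c == '8' || c == '9' || c == '-' || c == '_'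

-- the for-loop over the characters; 'break' is the non-recursive -1 branch
def pvLoopA : List Char → Int → Int
  | [], estado => estado
  | c :: rest, estado =>
    if estado == 0 && pvLetterChainA c then pvLoopA rest 1
    else if estado == 1 && pvTailChainA c then pvLoopA rest 1
    else -1

def automataId (lexema : String) : String :=
  let estado := pvLoopA lexema.toList 0
  let estadoFinal : List Int := [1]
  if estado == -1 then "EN ESTADO TRAMPA"
  else if estadoFinal.contains estado then "ESTADO FINAL"
  else "NO ACEPTADO"

-- ===== PORT B =====
def pvLettersB : List Char := "abcdefghijklmnopqrstuvwxyzABCDEFGHIJKLMNOPQRSTUVWXYZ".toList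
def pvTailB : List Char := pvLettersB ++ "0123456789-_".toList

def automataId_alt (lexema : String) : String :=
  match lexema.toList with
  | [] => "NO ACEPTADO"
  | c :: _ =>
    -- 'lexema[0] in LETTERS and not set(lexema) - set(TAIL)'
    if pvLettersB.contains c
        && (PySem.Set.diff (PySem.Set.ofList lexema.toList) (PySem.Set.ofList pvTailB)).isEmpty
    then "ESTADO FINAL"
    else "EN ESTADO TRAMPA"

-- ===== PRECONDITION & SPEC =====
def Spec_automataId (lexema : String) (out : String) : Prop := out = automataId_alt lexema
instance (lexema : String) (out : String) : Decidable (Spec_automataId lexema out) := by unfold Spec_automataId; infer_instance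

-- ===== CLAIM (what is proved, stated in full; the proofs are below) =====
def Claim_equal_automataId : Prop := ∀ (lexema : String), Dom_automataId lexema → Spec_automataId lexema (automataId lexema)

-- ===== LEMMAS AND PROOFS =====
theorem pvLetter_iff (c : Char) : pvLetterChainA c = true ↔ c ∈ pvLettersB := by
  simp [pvLetterChainA, pvLettersB, or_assoc]

theorem pvTail_iff (c : Char) : pvTailChainA c = true ↔ c ∈ pvTailB := by
  simp [pvTailChainA, pvTailB, pvLettersB, or_assoc]

theorem pvLetter_tail {c : Char} (h : c ∈ pvLettersB) : c ∈ pvTailB := by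
  simp [pvTailB, h]

-- the estado-1 tail loop accepts exactly the lists all of whose characters pass pvTailChainA
theorem pvLoop1 (cs : List Char) :
    pvLoopA cs 1 = if cs.all pvTailChainA then 1 else -1 := by
  induction cs with
  | nil => rfl
  | cons c rest ih =>
    by_cases h : pvTailChainA c = true
    · simpa [pvLoopA, h] using ih
    · simp [pvLoopA, h]

-- B's set difference is empty iff every character of the list is in the tail alphabet
theorem pvDiff_empty (xs : List Char) :
    (PySem.Set.diff (PySem.Set.ofList xs) (PySem.Set.ofList pvTailB)).isEmpty = true
      ↔ ∀ x ∈ xs, x ∈ pvTailB := by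
  rw [List.isEmpty_iff, List.eq_nil_iff_forall_not_mem]
  constructor
  · intro h x hx
    by_contra hnot
    exact h x (by
      rw [PySem.Set.mem_diff, PySem.Set.mem_ofList, PySem.Set.mem_ofList]
      exact ⟨hx, hnot⟩)
  · intro h x hx
    rw [PySem.Set.mem_diff, PySem.Set.mem_ofList, PySem.Set.mem_ofList] at hx
    exact hx.2 (h x hx.1)

-- ===== VERDICT (by name: the statement is the Claim_ definition above) =====
theorem automataId_spec : Claim_equal_automataId := by
  intro lexema _
  unfold Spec_automataId automataId automataId_alt
  cases hcs : lexema.toList with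
  | nil => simp [pvLoopA]
  | cons c rest =>
    by_cases hl : c ∈ pvLettersB
    · have hl' : pvLetterChainA c = true := (pvLetter_iff c).mpr hl
      by_cases ht : rest.all pvTailChainA = true
      · have hall : ∀ x ∈ c :: rest, x ∈ pvTailB := by
          intro x hx
          rcases List.mem_cons.mp hx with hx1 | hx1
          · exact hx1 ▸ pvLetter_tail hl
          · exact (pvTail_iff x).mp (List.all_eq_true.mp ht x hx1)
        have hd := (pvDiff_empty (c :: rest)).mpr hall
        simp [pvLoopA, hl', pvLoop1, ht, hl, hd]
      · have hd : (PySem.Set.diff (PySem.Set.ofList (c :: rest)) (PySem.Set.ofList pvTailB)).isEmpty ≠ true := by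
          intro hemp
          apply ht
          rw [List.all_eq_true]
          intro x hx
          exact (pvTail_iff x).mpr ((pvDiff_empty (c :: rest)).mp hemp x (by simp [hx]))
        simp [pvLoopA, hl', pvLoop1, ht, hl, hd]
    · have hl' : pvLetterChainA c = false :=
        Bool.eq_false_iff.mpr (fun hx => hl ((pvLetter_iff c).mp hx))
      simp [pvLoopA, hl', hl]
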